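-- pv_equiv track=rewrite | github.com/job4sergey/algo_workout | informatics_msk_ru/ds_algs_course/arithmetics/gcd_lcm_reduceable_tasks/task_f__ratio/MccSolution.py | solution
-- ===== SOURCE A (Python) =====
-- def solution(n):
--     def gcd(x, y):
--         while y:
--             x, y = y, x % y
--
--         return x
--
--     h = n // 2
--
--     no, de = (h - 1, h + 1) if n % 2 == 0 else (h, h + 1)
--
--     while no > 0:
--         if gcd(no, de) == 1:
--             break
--
--         no -= 1
--         de += 1
--
--     return no, de
-- ===== SOURCE B (Python) =====
-- def solution(n):
--     h = n // 2
--     if n % 2: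
--         return h, h + 1
--     # even n: distinct prime factors of n; gcd(no, n - no) = gcd(no, n)
--     primes = []
--     m = n
--     d = 2
--     while d * d <= m:
--         if m % d == 0:
--             primes.append(d)
--             while m % d == 0:
--                 m //= d
--         d += 1
--     if m > 1:
--         primes.append(m)
--     no = h - 1
--     while no > 0 and any(no % p == 0 for p in primes):
--         no -= 1
--     return no, n - no
-- ===== Notes on version B (the rewrite author's own statement) =====
-- stated objective: alternative
-- what changed: Instead of running Euclid's gcd on the evolving pair (no, de) at every step, B returns the odd case immediately (consecutive integers are coprime), factorizes n once by trial division into its distinct prime factors (using gcd(no, n-no) = gcd(no, n)), and walks no downward testing only divisibility by those primes, recomputing de = n - no at the end.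
import Mathlib
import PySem

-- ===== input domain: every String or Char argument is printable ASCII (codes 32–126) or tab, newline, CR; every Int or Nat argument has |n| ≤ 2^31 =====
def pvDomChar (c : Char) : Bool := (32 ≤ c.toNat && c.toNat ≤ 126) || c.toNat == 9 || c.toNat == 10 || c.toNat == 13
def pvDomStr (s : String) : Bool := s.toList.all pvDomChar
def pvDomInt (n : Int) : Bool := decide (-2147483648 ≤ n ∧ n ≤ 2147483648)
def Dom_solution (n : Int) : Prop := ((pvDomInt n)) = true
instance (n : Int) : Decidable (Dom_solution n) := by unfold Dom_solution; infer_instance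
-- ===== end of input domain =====

-- B replaces A's per-candidate gcd test by one trial-division factorization of n followed by
-- divisibility tests against n's distinct prime factors (alternative decomposition, same results).

-- ===== PORT A =====
-- A's inner helper: `while y: x, y = y, x % y`
def pygcd (x y : Int) : Int :=
  if _hy : y = 0 then x else pygcd y (PySem.Int.mod x y)
termination_by y.natAbs
decreasing_by
  rcases lt_trichotomy y 0 with h | h | h
  · have := PySem.Int.mod_neg_bounds x h; omega
  · exact absurd h _hy
  · have h1 := PySem.Int.mod_nonneg x h
    have h2 := PySem.Int.mod_lt x h
    omega

-- A's `while no > 0: if gcd(no, de) == 1: break; no -= 1; de += 1`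
def loopA (no de : Int) : Int × Int :=
  if 0 < no then
    if pygcd no de = 1 then (no, de)
    else loopA (no - 1) (de + 1)
  else (no, de)
termination_by no.toNat
decreasing_by omega

def solution (n : Int) : Int × Int :=
  let h := PySem.Int.floordiv n 2
  let p := if PySem.Int.mod n 2 = 0 then (h - 1, h + 1) else (h, h + 1)
  loopA p.1 p.2

-- ===== PORT B =====
-- cited by the termination proofs of stripLoop and factorLoop
theorem pvEdivLt (m d : Int) (hm : 0 < m) (hd : 2 ≤ d) : m / d < m := by
  have h1 := Int.emod_nonneg m (by omega : d ≠ 0)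
  have h2 := Int.mul_ediv_add_emod m d
  have h3 : 0 ≤ m / d := Int.ediv_nonneg (le_of_lt hm) (by omega)
  nlinarith

-- inner `while m % d == 0: m //= d`  (the extra guards 0 < m, 2 ≤ d only make the recursion
-- total; they hold on every state the outer loop reaches)
def stripLoop (m d : Int) : Int :=
  if h : 0 < m ∧ 2 ≤ d ∧ PySem.Int.mod m d = 0 then stripLoop (PySem.Int.floordiv m d) d else m
termination_by m.toNat
decreasing_by
  obtain ⟨hm, hd, _⟩ := h
  rw [PySem.Int.floordiv_eq_ediv_of_pos (by omega)]
  have h1 := pvEdivLt m d hm hd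
  have h3 : 0 ≤ m / d := Int.ediv_nonneg (le_of_lt hm) (by omega)
  omega

-- cited by factorLoop's termination proof
theorem stripLoop_le (m d : Int) : stripLoop m d ≤ m := by
  fun_induction stripLoop m d with
  | case1 m h ih =>
    obtain ⟨hm, hd, _⟩ := h
    have : PySem.Int.floordiv m d ≤ m := by
      rw [PySem.Int.floordiv_eq_ediv_of_pos (by omega)]
      exact le_of_lt (pvEdivLt m d hm hd)
    omega
  | case2 => exact le_refl _

-- outer `while d * d <= m: if m % d == 0: primes.append(d); <strip>; d += 1`
def factorLoop (m d : Int) (primes : List Int) : List Int × Int :=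
  if hl : d * d ≤ m then
    if PySem.Int.mod m d = 0 then factorLoop (stripLoop m d) (d + 1) (primes ++ [d])
    else factorLoop m (d + 1) primes
  else (primes, m)
termination_by (m + 1 - d).toNat
decreasing_by
  · have hmnn : 0 ≤ m := le_trans (mul_self_nonneg d) hl
    have hdm : d ≤ m := by nlinarith
    have hle : stripLoop m d ≤ m := stripLoop_le m d
    omega
  · have hmnn : 0 ≤ m := le_trans (mul_self_nonneg d) hl
    have hdm : d ≤ m := by nlinarith
    omega

-- `while no > 0 and any(no % p == 0 for p in primes): no -= 1`
def loopB (primes : List Int) (no : Int) : Int :=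
  if 0 < no ∧ primes.any (fun p => PySem.Int.mod no p == 0) then loopB primes (no - 1) else no
termination_by no.toNat
decreasing_by omega

def solution_alt (n : Int) : Int × Int :=
  let h := PySem.Int.floordiv n 2
  if PySem.Int.mod n 2 ≠ 0 then (h, h + 1)
  else
    let fm := factorLoop n 2 []
    let primes := if 1 < fm.2 then fm.1 ++ [fm.2] else fm.1
    let no := loopB primes (h - 1)
    (no, n - no)

-- ===== PRECONDITION & SPEC =====
def Spec_solution (n : Int) (out : Int × Int) : Prop := out = solution_alt n
instance (n : Int) (out : Int × Int) : Decidable (Spec_solution n out) := by unfold Spec_solution; infer_instance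

-- ===== CLAIM (what is proved, stated in full; the proofs are below) =====
def Claim_equal_solution : Prop := ∀ (n : Int), Dom_solution n → Spec_solution n (solution n)

-- ===== LEMMAS AND PROOFS =====


theorem stripLoop_pos (m d : Int) : 0 < m → 0 < stripLoop m d := by
  fun_induction stripLoop m d with
  | case1 m h ih =>
    intro hm
    obtain ⟨hm', hd, hmod⟩ := h
    apply ih
    rw [PySem.Int.floordiv_eq_ediv_of_pos (by omega)]
    have hdvd : d ∣ m := (PySem.Int.mod_eq_zero_iff_dvd m d).mp hmod
    exact Int.ediv_pos_of_pos_of_dvd hm' (by omega) hdvd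
  | case2 m h => exact fun hm => hm

theorem stripLoop_dvd (m d : Int) : stripLoop m d ∣ m := by
  fun_induction stripLoop m d with
  | case1 m h ih =>
    obtain ⟨hm', hd, hmod⟩ := h
    have hdvd : d ∣ m := (PySem.Int.mod_eq_zero_iff_dvd m d).mp hmod
    have h2 : PySem.Int.floordiv m d ∣ m := by
      rw [PySem.Int.floordiv_eq_ediv_of_pos (by omega)]
      exact Int.ediv_dvd_of_dvd hdvd
    exact dvd_trans ih h2
  | case2 m h => exact dvd_refl m

theorem stripLoop_not_dvd (m d : Int) : 0 < m → 2 ≤ d → ¬ d ∣ stripLoop m d := by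
  fun_induction stripLoop m d with
  | case1 m h ih =>
    intro hm hd
    obtain ⟨hm', hd', hmod⟩ := h
    apply ih
    · rw [PySem.Int.floordiv_eq_ediv_of_pos (by omega)]
      exact Int.ediv_pos_of_pos_of_dvd hm' (by omega)
        ((PySem.Int.mod_eq_zero_iff_dvd m d).mp hmod)
    · exact hd
  | case2 m h =>
    intro hm hd hdvd
    exact h ⟨hm, hd, (PySem.Int.mod_eq_zero_iff_dvd m d).mpr hdvd⟩

theorem stripLoop_prime_dvd (m d q : Int) (hq : Prime q) (hqd : ¬ q ∣ d) :
    q ∣ m → q ∣ stripLoop m d := by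
  fun_induction stripLoop m d with
  | case1 m h ih =>
    intro hqm
    obtain ⟨hm', hd, hmod⟩ := h
    apply ih
    have hdvd : d ∣ m := (PySem.Int.mod_eq_zero_iff_dvd m d).mp hmod
    rw [PySem.Int.floordiv_eq_ediv_of_pos (by omega)]
    obtain ⟨c, hc⟩ := hdvd
    have hcd : m / d = c := by rw [hc]; exact Int.mul_ediv_cancel_left c (by omega)
    rw [hcd]
    rcases hq.2.2 d c (hc ▸ hqm) with h1 | h1
    · exact absurd h1 hqd
    · exact h1
  | case2 m h => exact id

theorem factorLoop_spec (n : Int) (m d : Int) (ps : List Int) :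
    0 < m → 2 ≤ d → m ∣ n →
    (∀ p ∈ ps, 2 ≤ p ∧ p ∣ n) →
    (∀ q : Int, Prime q → 0 < q → q ∣ n → q ∈ ps ∨ q ∣ m) →
    (∀ k : Int, 2 ≤ k → k < d → ¬ k ∣ m) →
    (∀ p ∈ (factorLoop m d ps).1, 2 ≤ p ∧ p ∣ n) ∧
    (∀ q : Int, Prime q → 0 < q → q ∣ n → q ∈ (factorLoop m d ps).1 ∨ q ∣ (factorLoop m d ps).2) ∧
    0 < (factorLoop m d ps).2 ∧ (factorLoop m d ps).2 ∣ n ∧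
    (∀ k : Int, 2 ≤ k → k * k ≤ (factorLoop m d ps).2 → ¬ k ∣ (factorLoop m d ps).2) := by
  fun_induction factorLoop m d ps with
  | case1 m d ps hl hmod ih =>
    intro hm hd hmn hps hcover hsmall
    have hddvd : d ∣ m := (PySem.Int.mod_eq_zero_iff_dvd m d).mp hmod
    have hspos : 0 < stripLoop m d := stripLoop_pos m d hm
    have hsdvd : stripLoop m d ∣ m := stripLoop_dvd m d
    apply ih hspos (by omega) (dvd_trans hsdvd hmn)
    · intro p hp
      rcases List.mem_append.mp hp with h1 | h1
      · exact hps p h1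
      · have : p = d := List.mem_singleton.mp h1
        subst this
        exact ⟨hd, dvd_trans hddvd hmn⟩
    · intro q hq hq0 hqn
      rcases hcover q hq hq0 hqn with h1 | h1
      · exact Or.inl (List.mem_append.mpr (Or.inl h1))
      · by_cases hqd : q ∣ d
        · have : q = d := by
            by_contra hne
            have hqlt : q < d := by
              have := Int.le_of_dvd (by omega) hqd
              omega
            have hq2 : 2 ≤ q := by
              have h := Int.prime_iff_natAbs_prime.mp hq
              have := h.two_le
              omega
            exact hsmall q hq2 hqlt h1
          exact Or.inl (List.mem_append.mpr (Or.inr (by simp [this])))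
        · exact Or.inr (stripLoop_prime_dvd m d q hq hqd h1)
    · intro k hk2 hkd
      by_cases hkd' : k < d
      · intro hdvd
        exact hsmall k hk2 hkd' (dvd_trans hdvd hsdvd)
      · have hkdd : k = d := by omega
        rw [hkdd]
        exact stripLoop_not_dvd m d hm hd
  | case2 m d ps hl hmod ih =>
    intro hm hd hmn hps hcover hsmall
    apply ih hm (by omega) hmn hps hcover
    intro k hk2 hkd
    by_cases hkd' : k < d
    · exact hsmall k hk2 hkd'
    · have hkdd : k = d := by omega
      rw [hkdd]
      intro hdvd
      exact hmod ((PySem.Int.mod_eq_zero_iff_dvd m d).mpr hdvd)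
  | case3 m d ps hl =>
    intro hm hd hmn hps hcover hsmall
    refine ⟨hps, fun q hq hq0 hqn => hcover q hq hq0 hqn, hm, hmn, ?_⟩
    intro k hk2 hkk
    apply hsmall k hk2
    nlinarith [not_le.mp hl]

theorem pygcd_eq (x y : Int) : 0 ≤ x → 0 ≤ y → pygcd x y = ↑(Int.gcd x y) := by
  fun_induction pygcd x y with
  | case1 x =>
    intro hx _
    rw [Int.gcd_zero_right]
    exact (Int.natAbs_of_nonneg hx).symm
  | case2 x y hy ih =>
    intro hx hy0
    have hpos : 0 < y := by omega
    rw [PySem.Int.mod_eq_emod_of_pos hpos] at *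
    have h1 : pygcd y (x % y) = ↑(Int.gcd y (x % y)) :=
      ih (le_of_lt hpos) (Int.emod_nonneg x (by omega))
    rw [h1]
    congr 1
    have h2 : x % y = x + (-(x / y)) * y := by rw [Int.emod_def]; ring
    rw [h2, Int.gcd_add_mul_right_right, Int.gcd_comm]

theorem loops_eq (n : Int) (P : List Int)
    (hiff : ∀ no : Int, 0 < no → no < n →
      (pygcd no (n - no) = 1 ↔ (P.any (fun p => PySem.Int.mod no p == 0)) = false)) :
    ∀ (k : Nat) (no : Int), no.toNat ≤ k → (0 < no → no < n) →
      loopA no (n - no) = (loopB P no, n - loopB P no) := by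
  intro k
  induction k with
  | zero =>
    intro no hk h2
    have hnp : ¬ 0 < no := by omega
    rw [loopA, loopB]
    simp [hnp]
  | succ k ih =>
    intro no hk h2
    by_cases hpos : 0 < no
    · have hlt := h2 hpos
      by_cases hg : pygcd no (n - no) = 1
      · have hany := (hiff no hpos hlt).mp hg
        rw [loopA, loopB]
        simp [hpos, hg, hany]
      · have hany : (P.any fun p => PySem.Int.mod no p == 0) = true := by
          rcases Bool.eq_false_or_eq_true (P.any fun p => PySem.Int.mod no p == 0) with h | h
          · exact h
          · exact absurd ((hiff no hpos hlt).mpr h) hg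
        rw [loopA, loopB]
        rw [if_pos hpos, if_neg hg,
          if_pos (show 0 < no ∧ (P.any fun p => PySem.Int.mod no p == 0) = true from ⟨hpos, hany⟩)]
        have he : n - no + 1 = n - (no - 1) := by ring
        rw [he]
        exact ih (no - 1) (by omega) (by omega)
    · rw [loopA, loopB]
      simp [hpos]


theorem primesP_spec (n : Int) (hn : 0 < n) :
    (∀ p ∈ (if 1 < (factorLoop n 2 []).2
        then (factorLoop n 2 []).1 ++ [(factorLoop n 2 []).2] else (factorLoop n 2 []).1),
      2 ≤ p ∧ p ∣ n) ∧
    (∀ q : Int, Prime q → 0 < q → q ∣ n →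
      q ∈ (if 1 < (factorLoop n 2 []).2
        then (factorLoop n 2 []).1 ++ [(factorLoop n 2 []).2] else (factorLoop n 2 []).1)) := by
  obtain ⟨Hps, Hcov, Hpos, Hdvd, Hsm⟩ :=
    factorLoop_spec n n 2 [] hn le_rfl dvd_rfl (by simp)
      (fun q _ _ hq => Or.inr hq) (by intro k hk2 hk; omega)
  constructor
  · intro p hp
    by_cases h12 : 1 < (factorLoop n 2 []).2
    · rw [if_pos h12] at hp
      rcases List.mem_append.mp hp with h1 | h1
      · exact Hps p h1
      · have : p = (factorLoop n 2 []).2 := List.mem_singleton.mp h1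
        rw [this]
        exact ⟨by omega, Hdvd⟩
    · rw [if_neg h12] at hp
      exact Hps p hp
  · intro q hq hq0 hqn
    rcases Hcov q hq hq0 hqn with h1 | h1
    · by_cases h12 : 1 < (factorLoop n 2 []).2
      · rw [if_pos h12]; exact List.mem_append.mpr (Or.inl h1)
      · rw [if_neg h12]; exact h1
    · by_cases h12 : 1 < (factorLoop n 2 []).2
      · -- the leftover cofactor is prime, so q = it
        have hm2 : (factorLoop n 2 []).2 = ((factorLoop n 2 []).2.toNat : Int) :=
          (Int.toNat_of_nonneg (by omega)).symm
        have hp2 : (factorLoop n 2 []).2.toNat.Prime := by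
          rw [Nat.prime_def_le_sqrt]
          refine ⟨by omega, ?_⟩
          intro k hk2 hks hkdvd
          have hkk : (k : Int) * k ≤ (factorLoop n 2 []).2 := by
            have := Nat.le_sqrt.mp hks
            omega
          apply Hsm (k : Int) (by exact_mod_cast hk2) hkk
          rw [hm2]
          exact_mod_cast hkdvd
        have hqnat : q.toNat.Prime := by
          have h := Int.prime_iff_natAbs_prime.mp hq
          have heq : q.natAbs = q.toNat := by omega
          rwa [heq] at h
        have hqd : q.toNat ∣ (factorLoop n 2 []).2.toNat := by
          have : q = (q.toNat : Int) := (Int.toNat_of_nonneg (by omega)).symm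
          rw [this, hm2] at h1
          exact_mod_cast h1
        have heq : q.toNat = (factorLoop n 2 []).2.toNat :=
          (Nat.prime_dvd_prime_iff_eq hqnat hp2).mp hqd
        have : q = (factorLoop n 2 []).2 := by omega
        rw [if_pos h12, this]
        exact List.mem_append.mpr (Or.inr (List.mem_singleton.mpr rfl))
      · -- cofactor is 1, so q ∣ 1: impossible for a prime
        have h1' : (factorLoop n 2 []).2 = 1 := by omega
        rw [h1'] at h1
        exact absurd (isUnit_of_dvd_one h1) hq.2.1

theorem gcd_iff_any (n : Int) (P : List Int)
    (hPall : ∀ p ∈ P, 2 ≤ p ∧ p ∣ n)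
    (hPcov : ∀ q : Int, Prime q → 0 < q → q ∣ n → q ∈ P) :
    ∀ no : Int, 0 < no → no < n →
      (pygcd no (n - no) = 1 ↔ (P.any (fun p => PySem.Int.mod no p == 0)) = false) := by
  intro no hpos hlt
  rw [pygcd_eq no (n - no) (by omega) (by omega)]
  have hgcd : Int.gcd no (n - no) = Int.gcd no n := by
    have he : n - no = n + (-1) * no := by ring
    rw [he, Int.gcd_add_mul_right_right]
  rw [hgcd]
  constructor
  · intro hg
    have hg1 : Int.gcd no n = 1 := by exact_mod_cast hg
    rcases Bool.eq_false_or_eq_true (P.any fun p => PySem.Int.mod no p == 0) with h | h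
    · exfalso
      obtain ⟨p, hpmem, hpb⟩ := List.any_eq_true.mp h
      have hpno : p ∣ no := (PySem.Int.mod_eq_zero_iff_dvd no p).mp (by
        have := beq_iff_eq.mp hpb
        exact this)
      obtain ⟨hp2, hpn⟩ := hPall p hpmem
      have : p ∣ ((Int.gcd no n : Nat) : Int) := Int.dvd_coe_gcd hpno hpn
      rw [hg1] at this
      have := Int.le_of_dvd (by norm_num) this
      omega
    · exact h
  · intro hany
    by_contra hg
    have hg1 : Int.gcd no n ≠ 1 := by
      intro h; apply hg; rw [h]; rfl
    have hncop : ¬ Nat.Coprime no.natAbs n.natAbs := hg1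
    obtain ⟨p, hp, hpno, hpn⟩ := Nat.Prime.not_coprime_iff_dvd.mp hncop
    have hpi : Prime (p : Int) := Nat.prime_iff_prime_int.mp hp
    have hpno' : (p : Int) ∣ no := by
      have := Int.natCast_dvd_natCast.mpr hpno
      rwa [Int.natAbs_of_nonneg (by omega)] at this
    have hpn' : (p : Int) ∣ n := by
      have := Int.natCast_dvd_natCast.mpr hpn
      rwa [Int.natAbs_of_nonneg (by omega)] at this
    have hmem : (p : Int) ∈ P := hPcov (p : Int) hpi (by exact_mod_cast hp.pos) hpn'
    have : (P.any fun p => PySem.Int.mod no p == 0) = true :=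
      List.any_eq_true.mpr ⟨(p : Int), hmem,
        beq_iff_eq.mpr ((PySem.Int.mod_eq_zero_iff_dvd no (p : Int)).mpr hpno')⟩
    rw [this] at hany
    exact absurd hany (by simp)

-- ===== VERDICT (by name: the statement is the Claim_ definition above) =====
theorem solution_spec : Claim_equal_solution := by
  unfold Claim_equal_solution Spec_solution
  intro n _
  by_cases hev : PySem.Int.mod n 2 = 0
  · -- even n
    have hh2 : n = 2 * PySem.Int.floordiv n 2 := by
      have e1 : PySem.Int.mod n 2 = n % 2 := PySem.Int.mod_eq_emod_of_pos (by norm_num)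
      have e2 : PySem.Int.floordiv n 2 = n / 2 := PySem.Int.floordiv_eq_ediv_of_pos (by norm_num)
      omega
    simp only [solution, solution_alt, hev, ne_eq, not_true_eq_false, if_false, ite_true]
    set h := PySem.Int.floordiv n 2 with hhdef
    set P := if 1 < (factorLoop n 2 []).2
      then (factorLoop n 2 []).1 ++ [(factorLoop n 2 []).2] else (factorLoop n 2 []).1 with hP
    by_cases hbig : 2 ≤ h
    · have hn4 : 0 < n := by omega
      obtain ⟨hPall, hPcov⟩ := primesP_spec n hn4
      rw [← hP] at hPall hPcov
      have hiff := gcd_iff_any n P hPall hPcov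
      have hmain := loops_eq n P hiff (h - 1).toNat (h - 1) le_rfl (by omega)
      have he : n - (h - 1) = h + 1 := by omega
      rw [he] at hmain
      exact hmain
    · -- n ≤ 2: neither loop runs
      rw [loopA, loopB]
      have h1 : ¬ 0 < h - 1 := by omega
      simp only [if_neg h1]
      have h2 : ¬ (0 < h - 1 ∧ (P.any fun p => PySem.Int.mod (h - 1) p == 0) = true) :=
        fun hc => h1 hc.1
      rw [if_neg h2]
      have : n - (h - 1) = h + 1 := by omega
      rw [this]
  · -- odd n: gcd(h, h+1) = 1, both return (h, h+1) at once
    simp only [solution, solution_alt, if_neg hev, if_pos hev]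
    set h := PySem.Int.floordiv n 2 with hhdef
    have hnn : 0 ≤ n ∨ n < 0 := by omega
    by_cases hpos : 0 < h
    · have hg : pygcd h (h + 1) = 1 := by
        rw [pygcd_eq h (h + 1) (by omega) (by omega)]
        have he : h + 1 = 1 + 1 * h := by ring
        rw [he, Int.gcd_add_mul_right_right, Int.gcd_one_right]
        rfl
      rw [loopA]
      simp [hpos, hg]
    · rw [loopA]
      simp [hpos]
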